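-- pv_equiv track=rewrite | github.com/MANZOORAHMED611/mzip | src/zipextractor/core/validation.py | detect_root_folder
-- ===== SOURCE A (Python) =====
-- def detect_root_folder(file_paths: list[str]) -> str | None:
--     """Detect if all files share a common root folder.
--
--     Checks if all file paths in the archive share a single common
--     root folder. This is useful for determining if the archive
--     was created from a single directory.
--
--     Args:
--         file_paths: List of file paths from the archive.
--
--     Returns:
--         The common root folder name if all files share one,
--         None otherwise or if the archive is empty.
--
--     Examples:
--         >>> detect_root_folder(["project/src/main.py", "project/README.md"])
--         'project'
--         >>> detect_root_folder(["src/main.py", "README.md"])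
--         None
--     """
--     if not file_paths:
--         return None
--
--     # Extract first path component for each file
--     root_folders = set()
--     for path in file_paths:
--         # Normalize path separators and get first component
--         normalized = path.replace("\\", "/").strip("/")
--         if not normalized:
--             continue
--
--         parts = normalized.split("/")
--         if len(parts) > 0:
--             root_folders.add(parts[0])
--
--     # Check if there's exactly one root folder and all paths are under it
--     if len(root_folders) == 1:
--         root = next(iter(root_folders))
--         # Verify all paths actually start with this root folder
--         # (not just files at the root level)
--         all_under_root = all(
--             path.replace("\\", "/").strip("/").startswith(root + "/")
--             or path.replace("\\", "/").strip("/") == root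
--             for path in file_paths
--             if path.replace("\\", "/").strip("/")
--         )
--         if all_under_root:
--             return root
--
--     return None
-- ===== SOURCE B (Python) =====
-- def detect_root_folder(file_paths: list[str]) -> str | None:
--     """Single early-exit scan: keep one running root candidate instead of a
--     set plus a second verification pass."""
--     root = None
--     for path in file_paths:
--         normalized = path.replace("\\", "/").strip("/")
--         if not normalized:
--             continue
--         first = normalized.split("/")[0]
--         if root is None:
--             root = first
--         elif first != root:
--             return None
--     return root
-- ===== Notes on version B (the rewrite author's own statement) =====
-- stated objective: simpler
-- what changed: Replaces the set of first components plus the redundant second all-under-root verification pass with a single early-exit scan maintaining one running root candidate.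
import Mathlib
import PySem

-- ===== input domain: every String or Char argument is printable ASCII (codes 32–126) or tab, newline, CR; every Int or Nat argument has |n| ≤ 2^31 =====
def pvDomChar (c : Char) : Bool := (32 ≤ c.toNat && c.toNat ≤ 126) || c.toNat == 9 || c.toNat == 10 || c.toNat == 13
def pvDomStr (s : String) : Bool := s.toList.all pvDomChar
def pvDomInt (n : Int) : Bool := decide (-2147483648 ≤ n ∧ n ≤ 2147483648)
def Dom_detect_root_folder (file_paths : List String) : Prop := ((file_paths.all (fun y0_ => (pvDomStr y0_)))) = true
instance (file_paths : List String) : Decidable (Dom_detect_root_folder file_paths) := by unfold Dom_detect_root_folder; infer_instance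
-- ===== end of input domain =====

-- B replaces A's set of first components plus A's second verification pass
-- by a single early-exit scan carrying one running root candidate (objective: simpler).

-- ===== PORT A =====
-- path.replace("\\", "/").strip("/")
def pvNormA (path : String) : String :=
  PySem.Str.stripChars (PySem.Str.replace path "\\" "/") "/"

def detect_root_folder (file_paths : List String) : Option String :=
  if file_paths = [] then none
  else
    -- root_folders = set(); for path in file_paths: … root_folders.add(parts[0])
    let root_folders : PySem.Set String :=
      file_paths.foldl (fun acc path =>
        let normalized := pvNormA path
        if normalized = "" then acc
        else
          let parts := (PySem.Str.split? normalized "/").getD []  -- sep "/" ≠ "", so split? is always `some`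
          if 0 < parts.length then PySem.Set.add acc (parts.headD "") else acc)
        PySem.Set.empty
    if root_folders.length = 1 then
      -- next(iter(root_folders)): the set is a singleton here, so iteration order is irrelevant
      let root := root_folders.headD ""
      let all_under_root := file_paths.all (fun path =>
        if pvNormA path = "" then true
        else PySem.Str.startswith (pvNormA path) (root ++ "/") || pvNormA path == root)
      if all_under_root then some root else none
    else none

-- ===== PORT B =====
def pvNormB (path : String) : String :=
  PySem.Str.stripChars (PySem.Str.replace path "\\" "/") "/"

-- the for-loop of B, with `return None` as the early exit
def pvScan (root : Option String) : List String → Option String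
  | [] => root
  | path :: rest =>
    let normalized := pvNormB path
    if normalized = "" then pvScan root rest
    else
      let first := ((PySem.Str.split? normalized "/").getD []).headD ""  -- split("/")[0]; sep ≠ "" and the split is never empty
      match root with
      | none => pvScan (some first) rest
      | some r => if first = r then pvScan (some r) rest else none

def detect_root_folder_alt (file_paths : List String) : Option String :=
  pvScan none file_paths

-- ===== PRECONDITION & SPEC =====
def Spec_detect_root_folder (file_paths : List String) (out : Option String) : Prop := out = detect_root_folder_alt file_paths
instance (file_paths : List String) (out : Option String) : Decidable (Spec_detect_root_folder file_paths out) := by unfold Spec_detect_root_folder; infer_instance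

-- ===== CLAIM (what is proved, stated in full; the proofs are below) =====
def Claim_equal_detect_root_folder : Prop := ∀ (file_paths : List String), Dom_detect_root_folder file_paths → Spec_detect_root_folder file_paths (detect_root_folder file_paths)

-- ===== LEMMAS AND PROOFS =====

-- first component of a normalized path, and the list of them over the contributing paths
def pvFirst (path : String) : String :=
  ((PySem.Str.split? (pvNormB path) "/").getD []).headD ""

def pvComps (fps : List String) : List String :=
  fps.filterMap (fun p => if pvNormB p = "" then none else some (pvFirst p))

-- splitOn.go never returns the empty list
theorem pvGo_ne_nil (sep : List Char) (fuel : Nat) (l cur : List Char) (acc : List (List Char)) :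
    PySem.Chars.splitOn.go sep fuel l cur acc ≠ [] := by
  induction fuel generalizing l cur acc with
  | zero => simp [PySem.Chars.splitOn.go]
  | succ fuel ih =>
    cases l with
    | nil => simp [PySem.Chars.splitOn.go]
    | cons c rest =>
      rw [PySem.Chars.splitOn.go]
      split
      · exact ih _ _ _
      · exact ih _ _ _

-- with a nonempty accumulator, the head of the final (reversed) result is the last accumulated piece
theorem pvGo_head_of_acc_ne_nil (sep : List Char) (fuel : Nat) (l cur : List Char)
    (acc : List (List Char)) (h : acc ≠ []) :
    (PySem.Chars.splitOn.go sep fuel l cur acc).head? = acc.getLast? := by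
  induction fuel generalizing l cur acc with
  | zero =>
    cases hg : acc.getLast? with
    | none => exact absurd (List.getLast?_eq_none_iff.mp hg) h
    | some a => simp [PySem.Chars.splitOn.go, List.head?_reverse, hg]
  | succ fuel ih =>
    cases l with
    | nil =>
      cases hg : acc.getLast? with
      | none => exact absurd (List.getLast?_eq_none_iff.mp hg) h
      | some a => simp [PySem.Chars.splitOn.go, List.head?_reverse, hg]
    | cons c rest =>
      rw [PySem.Chars.splitOn.go]
      split
      · rw [ih _ _ _ (by simp)]
        cases hg : acc.getLast? with
        | none => exact absurd (List.getLast?_eq_none_iff.mp hg) h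
        | some a => simp [List.getLast?_cons, hg]
      · exact ih _ _ _ h

-- the first piece produced by go on separator "/" is cur.reverse followed by a prefix of l
theorem pvGo_first (fuel : Nat) (l cur : List Char) :
    ∃ t, (PySem.Chars.splitOn.go ['/'] fuel l cur []).head? = some (cur.reverse ++ t) ∧
      (t = l ∨ (t ++ ['/']) <+: l) := by
  induction fuel generalizing l cur with
  | zero => exact ⟨l, by simp [PySem.Chars.splitOn.go], Or.inl rfl⟩
  | succ fuel ih =>
    cases l with
    | nil => exact ⟨[], by simp [PySem.Chars.splitOn.go], Or.inl rfl⟩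
    | cons c rest =>
      rw [PySem.Chars.splitOn.go]
      split
      · rename_i hp
        have hc : c = '/' := by
          obtain ⟨t0, ht0⟩ := List.isPrefixOf_iff_prefix.mp hp
          injection ht0 with h1 h2
          exact h1.symm
        refine ⟨[], ?_, Or.inr ?_⟩
        · rw [pvGo_head_of_acc_ne_nil _ _ _ _ _ (by simp)]; simp
        · subst hc; exact ⟨rest, rfl⟩
      · rename_i hp
        obtain ⟨t, h1, h2⟩ := ih rest (c :: cur)
        refine ⟨c :: t, ?_, ?_⟩
        · rw [h1]; simp
        · rcases h2 with h2 | h2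
          · exact Or.inl (by simp [h2])
          · right
            obtain ⟨u, hu⟩ := h2
            exact ⟨u, by simp [← hu]⟩

theorem pvSplitOn_first (cs : List Char) :
    ∃ t, (PySem.Chars.splitOn cs ['/']).head? = some t ∧ (t = cs ∨ (t ++ ['/']) <+: cs) := by
  obtain ⟨t, h1, h2⟩ := pvGo_first (cs.length + 1) cs []
  exact ⟨t, by simpa [PySem.Chars.splitOn] using h1, h2⟩

theorem pvSplitOn_ne_nil (cs : List Char) : PySem.Chars.splitOn cs ['/'] ≠ [] :=
  pvGo_ne_nil _ _ _ _ _

-- the string-level split used by both ports, in terms of Chars.splitOn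
theorem pvParts_eq (n : String) :
    (PySem.Str.split? n "/").getD [] = (PySem.Chars.splitOn n.toList ['/']).map String.ofList := by
  simp [PySem.Str.split?, PySem.Chars.split?]

theorem pvParts_ne_nil (n : String) : (PySem.Str.split? n "/").getD [] ≠ [] := by
  rw [pvParts_eq]
  simpa using pvSplitOn_ne_nil n.toList

theorem pvFirst_toList (p : String) :
    (pvFirst p).toList = (PySem.Chars.splitOn (pvNormB p).toList ['/']).headD [] := by
  rw [pvFirst, pvParts_eq]
  obtain ⟨t, h1, _⟩ := pvSplitOn_first (pvNormB p).toList
  simp [List.head?_map, h1]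

-- A's verification predicate always holds for a path whose first component is pvFirst p
theorem pvCheck (p : String) :
    (PySem.Str.startswith (pvNormB p) (pvFirst p ++ "/") || pvNormB p == pvFirst p) = true := by
  obtain ⟨t, h1, h2⟩ := pvSplitOn_first (pvNormB p).toList
  have hf : (pvFirst p).toList = t := by rw [pvFirst_toList, List.headD_eq_head?, h1]; rfl
  rcases h2 with h2 | h2
  · have he : pvNormB p = pvFirst p :=
      String.toList_inj.mp (by rw [hf, h2])
    simp [he]
  · simp
    left
    rw [PySem.Chars.startswith_iff, hf]
    exact h2

-- A's set-building loop is Set.update by the list of first components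
theorem pvFoldA (fps : List String) (acc : PySem.Set String) :
    fps.foldl (fun acc path =>
        let normalized := pvNormA path
        if normalized = "" then acc
        else
          let parts := (PySem.Str.split? normalized "/").getD []
          if 0 < parts.length then PySem.Set.add acc (parts.headD "") else acc) acc
      = PySem.Set.update acc (pvComps fps) := by
  induction fps generalizing acc with
  | nil => simp [pvComps, PySem.Set.update]
  | cons p rest ih =>
    by_cases hn : pvNormB p = ""
    · simp only [List.foldl_cons, pvComps, List.filterMap_cons, hn, if_pos]
      have : pvNormA p = "" := hn
      simp only [this, if_pos]
      exact ih acc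
    · have hlen : 0 < ((PySem.Str.split? (pvNormB p) "/").getD []).length :=
        List.length_pos_iff.mpr (pvParts_ne_nil _)
      simp only [List.foldl_cons, pvComps, List.filterMap_cons, hn]
      have hA : pvNormA p = pvNormB p := rfl
      simp only [hA, hn, hlen, if_pos]
      have : ((PySem.Str.split? (pvNormB p) "/").getD []).headD "" = pvFirst p := rfl
      rw [this]
      exact ih _

-- B's scan in terms of the first components
theorem pvScanB (fps : List String) (r : Option String) :
    pvScan r fps = match r with
      | none => (match pvComps fps with
                 | [] => none
                 | c :: cs => if cs.all (· == c) then some c else none)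
      | some r => if (pvComps fps).all (· == r) then some r else none := by
  induction fps generalizing r with
  | nil => cases r <;> simp [pvScan, pvComps]
  | cons p rest ih =>
    by_cases hn : pvNormB p = ""
    · rw [pvScan]
      simp only [hn, if_pos]
      rw [ih]
      have hc : pvComps (p :: rest) = pvComps rest := by
        simp [pvComps, hn]
      rw [hc]
    · rw [pvScan]
      have hfe : ((PySem.Str.split? (pvNormB p) "/").getD []).headD "" = pvFirst p := rfl
      simp only [hn, reduceIte, hfe]
      have hc : pvComps (p :: rest) = pvFirst p :: pvComps rest := by
        simp [pvComps, hn]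
      rw [hc]
      cases r with
      | none => rw [ih]
      | some r =>
        dsimp only
        by_cases hr : pvFirst p = r
        · subst hr
          rw [if_pos rfl, ih]
          simp
        · rw [if_neg hr]
          simp [List.all_cons, hr]

-- every first component equals the head when the tail is all-equal
theorem pvOfList_all_eq {c : String} {cs : List String} (h : ∀ x ∈ cs, x = c) :
    PySem.Set.ofList (c :: cs) = [c] := by
  rw [PySem.Set.ofList_cons]
  have : PySem.Set.discard (PySem.Set.ofList cs) c = [] := by
    rw [List.eq_nil_iff_forall_not_mem]
    intro x hx
    rw [PySem.Set.mem_discard] at hx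
    exact hx.2 (h x ((PySem.Set.mem_ofList _ _).mp hx.1))
  rw [this]

-- ===== VERDICT (by name: the statement is the Claim_ definition above) =====
theorem detect_root_folder_spec : Claim_equal_detect_root_folder := by
  intro fps _
  show detect_root_folder fps = detect_root_folder_alt fps
  rw [detect_root_folder, detect_root_folder_alt, pvScanB]
  simp only []
  by_cases hemp : fps = []
  · subst hemp; simp [pvComps]
  · simp only [hemp]
    rw [pvFoldA]
    have hupd : PySem.Set.update PySem.Set.empty (pvComps fps) = PySem.Set.ofList (pvComps fps) :=
      PySem.Set.update_nil_left _
    rw [hupd]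
    cases hc : pvComps fps with
    | nil => simp
    | cons c cs =>
      by_cases hall : ∀ x ∈ cs, x = c
      · rw [pvOfList_all_eq hall]
        have hall' : cs.all (· == c) = true := by
          simp only [List.all_eq_true]
          intro x hx; simpa using hall x hx
        have hroot : ∀ p ∈ fps, pvNormB p ≠ "" → pvFirst p = c := by
          intro p hp hn
          have : pvFirst p ∈ pvComps fps := by
            rw [pvComps, List.mem_filterMap]
            exact ⟨p, hp, by simp [hn]⟩
          rw [hc] at this
          rcases List.mem_cons.mp this with h | h
          · exact h
          · exact hall _ h
        simp [hall']
        intro x hx hne hsw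
        have hpc := pvCheck x
        have hne' : pvNormB x ≠ "" := hne
        rw [hroot x hx hne'] at hpc
        simp at hpc
        have hsw' : PySem.Chars.startswith (pvNormB x).toList (c.toList ++ ['/']) = false := hsw
        rcases hpc with h | h
        · simp [h] at hsw'
        · exact h
      · push Not at hall
        obtain ⟨d, hd, hdc⟩ := hall
        have hlen : (PySem.Set.ofList (c :: cs)).length ≠ 1 := by
          intro h1
          obtain ⟨x, hx⟩ := List.length_eq_one_iff.mp h1
          have hcx : c ∈ PySem.Set.ofList (c :: cs) := (PySem.Set.mem_ofList _ _).mpr (by simp)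
          have hdx : d ∈ PySem.Set.ofList (c :: cs) := (PySem.Set.mem_ofList _ _).mpr (by simp [hd])
          rw [hx] at hcx hdx
          simp at hcx hdx
          exact hdc (hdx.trans hcx.symm)
        have hall' : cs.all (· == c) = false := by
          rw [List.all_eq_false]
          exact ⟨d, hd, by simpa using hdc⟩
        simp [hlen, hall']
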